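-- pv_equiv track=rewrite | github.com/greatertomi/Codility-Practices | Solutions/PrefixSum/CountDiv.py | solution
-- ===== SOURCE A (Python) =====
-- def solution(start, end, mod):
--     if start > end or mod == 0:
--         return None
--
--     countDiv = 0
--     for num in range(start, end):
--         if (num > mod) and (num % mod == 0):
--             countDiv += 1
--
--     return countDiv
-- ===== SOURCE B (Python) =====
-- def solution(start, end, mod):
--     if start > end or mod == 0:
--         return None
--     lo = max(start, mod + 1)   # smallest candidate > mod
--     hi = end - 1               # range(start, end) is inclusive of end-1
--     if hi < lo:
--         return 0
--     m = abs(mod)               # num % mod == 0  <=>  abs(mod) divides num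
--     return hi // m - (lo - 1) // m
-- ===== Notes on version B (the rewrite author's own statement) =====
-- stated objective: faster
-- what changed: Replaced the per-element loop over range(start, end) by a closed-form floor-division count of multiples of abs(mod) in [max(start, mod+1), end-1].
import Mathlib
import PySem

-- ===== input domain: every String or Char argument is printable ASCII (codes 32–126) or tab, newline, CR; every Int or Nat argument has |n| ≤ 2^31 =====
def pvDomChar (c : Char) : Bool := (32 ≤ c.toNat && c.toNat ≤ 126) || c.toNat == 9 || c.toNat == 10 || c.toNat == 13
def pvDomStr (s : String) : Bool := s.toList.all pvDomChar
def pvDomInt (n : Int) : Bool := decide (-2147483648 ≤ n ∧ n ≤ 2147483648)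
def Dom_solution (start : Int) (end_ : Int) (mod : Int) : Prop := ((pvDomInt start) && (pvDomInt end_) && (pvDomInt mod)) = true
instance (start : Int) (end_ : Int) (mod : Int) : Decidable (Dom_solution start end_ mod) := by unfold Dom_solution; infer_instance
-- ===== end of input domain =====

-- ===== PORT A =====
-- Port of A: counted loop over range(start, end).
def solution (start : Int) (end_ : Int) (mod : Int) : Option Int :=
  if start > end_ ∨ mod = 0 then none
  else
    some ((PySem.List.pyRange start end_ 1).foldl
      (fun countDiv num =>
        if num > mod ∧ PySem.Int.mod num mod = 0 then countDiv + 1 else countDiv) 0)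

-- ===== PORT B =====
-- B: O(1) closed-form count of multiples of abs(mod) in [max(start, mod+1), end-1].
def solution_alt (start : Int) (end_ : Int) (mod : Int) : Option Int :=
  if start > end_ ∨ mod = 0 then none
  else
    let lo := max start (mod + 1)
    let hi := end_ - 1
    if hi < lo then some 0
    else some (PySem.Int.floordiv hi |mod| - PySem.Int.floordiv (lo - 1) |mod|)

-- ===== PRECONDITION & SPEC =====
def Spec_solution (start : Int) (end_ : Int) (mod : Int) (out : Option Int) : Prop := out = solution_alt start end_ mod
instance (start : Int) (end_ : Int) (mod : Int) (out : Option Int) : Decidable (Spec_solution start end_ mod out) := by unfold Spec_solution; infer_instance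

-- ===== CLAIM (what is proved, stated in full; the proofs are below) =====
def Claim_equal_solution : Prop := ∀ (start : Int) (end_ : Int) (mod : Int), Dom_solution start end_ mod → Spec_solution start end_ mod (solution start end_ mod)

-- ===== LEMMAS AND PROOFS =====

-- x/m - (x-1)/m is 1 exactly at multiples of m (m > 0, ediv).
lemma fdiv_step (m x : Int) (hm : 0 < m) :
    x / m - (x - 1) / m = if m ∣ x then 1 else 0 := by
  have h1 := Int.mul_ediv_add_emod x m
  have h2 := Int.mul_ediv_add_emod (x - 1) m
  have h3 := Int.emod_nonneg x (by omega : m ≠ 0)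
  have h4 := Int.emod_lt_of_pos x hm
  have h5 := Int.emod_nonneg (x - 1) (by omega : m ≠ 0)
  have h6 := Int.emod_lt_of_pos (x - 1) hm
  set q := x / m with hq
  set q' := (x - 1) / m with hq'
  set r := x % m with hr
  set r' := (x - 1) % m with hr'
  have hd1 : q - q' ≤ 1 := by
    have hmul : m * (q - q') ≤ m * 1 := by ring_nf; nlinarith [h1, h2]
    exact le_of_mul_le_mul_left hmul hm
  have hd0 : 0 ≤ q - q' := by
    have hmul : m * (-1) < m * (q - q') := by ring_nf; nlinarith [h1, h2]
    have := lt_of_mul_lt_mul_left hmul (le_of_lt hm)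
    omega
  have hdiff : m * (q - q') = r' - r + 1 := by ring_nf; nlinarith [h1, h2]
  have key : q - q' = if r = 0 then 1 else 0 := by
    interval_cases h : (q - q')
    · simp only [mul_zero] at hdiff
      have hrne : r ≠ 0 := by omega
      simp [hrne]
    · simp only [mul_one] at hdiff
      have hr0 : r = 0 := by omega
      simp [hr0]
  by_cases hdv : m ∣ x
  · have hr0 : r = 0 := by rw [hr]; exact Int.emod_eq_zero_of_dvd hdv
    rw [if_pos hdv]
    simp [hr0] at key
    omega
  · have hr0 : r ≠ 0 := by rw [hr]; exact fun h => hdv (Int.dvd_of_emod_eq_zero h)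
    rw [if_neg hdv]
    simp [hr0] at key
    omega

-- shifting the initial accumulator of the counting fold
lemma foldl_count_shift (p : Int → Bool) (l : List Int) :
    ∀ c : Int, l.foldl (fun c num => if p num then c + 1 else c) c
      = c + l.foldl (fun c num => if p num then c + 1 else c) 0 := by
  induction l with
  | nil => intro c; simp
  | cons x xs ih =>
    intro c
    simp only [List.foldl_cons]
    rw [ih (if p x then c + 1 else c), ih (if p x then (0:Int) + 1 else 0)]
    split <;> ring

-- the loop of A computes the closed form of B
lemma count_loop (mod end_ : Int) (hm : mod ≠ 0) :
    ∀ (n : Nat) (a : Int), (end_ - a).toNat = n →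
      (PySem.List.pyRange a end_ 1).foldl
        (fun c num => if num > mod ∧ PySem.Int.mod num mod = 0 then c + 1 else c) 0
      = if end_ - 1 < max a (mod + 1) then 0
        else (end_ - 1) / |mod| - (max a (mod + 1) - 1) / |mod| := by
  have habs : 0 < |mod| := abs_pos.mpr hm
  intro n
  induction n with
  | zero =>
    intro a ha
    have hba : end_ ≤ a := by omega
    rw [PySem.List.pyRange_one_eq_nil hba]
    have : end_ - 1 < max a (mod + 1) := lt_of_lt_of_le (by omega) (le_max_left _ _)
    simp [this]
  | succ k ih =>
    intro a ha
    have hab : a < end_ := by omega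
    rw [PySem.List.pyRange_one_cons hab, List.foldl_cons]
    have hp : ∀ (l : List Int) (c : Int),
        l.foldl (fun c num => if num > mod ∧ PySem.Int.mod num mod = 0 then c + 1 else c) c
        = c + l.foldl (fun c num => if num > mod ∧ PySem.Int.mod num mod = 0 then c + 1 else c) 0 := by
      intro l c
      have := foldl_count_shift (fun num => decide (num > mod ∧ PySem.Int.mod num mod = 0)) l c
      simpa using this
    rw [hp]
    rw [ih (a + 1) (by omega)]
    have hdvd : (PySem.Int.mod a mod = 0) ↔ |mod| ∣ a := by
      rw [PySem.Int.mod_eq_zero_iff_dvd, abs_dvd]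
    by_cases hcase : a > mod
    · -- max a (mod+1) = a, max (a+1) (mod+1) = a+1
      have hmax1 : max a (mod + 1) = a := max_eq_left (by omega)
      have hmax2 : max (a + 1) (mod + 1) = a + 1 := max_eq_left (by omega)
      rw [hmax1, hmax2]
      have hhi : ¬ (end_ - 1 < a) := by omega
      rw [if_neg hhi]
      by_cases hlast : end_ - 1 < a + 1
      · -- end_ - 1 = a
        have hea : end_ - 1 = a := by omega
        rw [if_pos hlast, hea]
        have := fdiv_step |mod| a habs
        by_cases hd : PySem.Int.mod a mod = 0
        · rw [if_pos ⟨hcase, hd⟩]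
          rw [if_pos (hdvd.mp hd)] at this
          omega
        · rw [if_neg (by tauto)]
          rw [if_neg (fun h => hd (hdvd.mpr h))] at this
          omega
      · rw [if_neg hlast]
        have := fdiv_step |mod| a habs
        by_cases hd : PySem.Int.mod a mod = 0
        · rw [if_pos ⟨hcase, hd⟩]
          rw [if_pos (hdvd.mp hd)] at this
          have h1 : (a + 1 - 1) = a := by ring
          rw [h1]
          omega
        · rw [if_neg (by tauto)]
          rw [if_neg (fun h => hd (hdvd.mpr h))] at this
          have h1 : (a + 1 - 1) = a := by ring
          rw [h1]
          omega
    · -- a ≤ mod: maxes agree, element not counted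
      have hmax1 : max a (mod + 1) = mod + 1 := max_eq_right (by omega)
      have hmax2 : max (a + 1) (mod + 1) = mod + 1 := max_eq_right (by omega)
      rw [hmax1, hmax2, if_neg (by tauto)]
      omega

-- ===== VERDICT (by name: the statement is the Claim_ definition above) =====
theorem solution_spec : Claim_equal_solution := by
  intro start end_ mod _hdom
  unfold Spec_solution solution solution_alt
  by_cases hguard : start > end_ ∨ mod = 0
  · rw [if_pos hguard, if_pos hguard]
  · rw [if_neg hguard, if_neg hguard]
    rw [not_or] at hguard; rw [not_lt] at hguard
    obtain ⟨hle, hm⟩ := hguard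
    have habs : 0 < |mod| := abs_pos.mpr hm
    rw [count_loop mod end_ hm (end_ - start).toNat start rfl]
    simp only [PySem.Int.floordiv_eq_ediv_of_pos habs]
    split <;> rfl
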